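-- pv_equiv track=rewrite | github.com/VISHNUS2004/cti-nlp-system | scripts/enhanced_cybersecurity_ner.py | create_training_data_for_custom_ner
-- ===== SOURCE A (Python) =====
-- def create_training_data_for_custom_ner(texts_and_labels):
--     """Create training data for custom cybersecurity NER"""
--     training_data = []
--
--     for text, labels in texts_and_labels:
--         tokens = text.split()  # Simple tokenization
--         token_labels = ['O'] * len(tokens)  # Default to 'O' (Outside)
--
--         # Assign labels based on the provided annotations
--         for entity_text, entity_type in labels:
--             # Find the entity in the text and assign BIO labels
--             entity_tokens = entity_text.split()
--             for i in range(len(tokens) - len(entity_tokens) + 1):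
--                 if tokens[i:i+len(entity_tokens)] == entity_tokens:
--                     token_labels[i] = f'B-{entity_type}'
--                     for j in range(1, len(entity_tokens)):
--                         token_labels[i+j] = f'I-{entity_type}'
--                     break
--
--         training_data.append({
--             'tokens': tokens,
--             'labels': token_labels
--         })
--
--     return training_data
-- ===== SOURCE B (Python) =====
-- def _first_match(tokens, et, index):
--     """First index where the token sequence et occurs in tokens, else None.
--     An empty pattern matches at index 0 (like str.find)."""
--     if not et:
--         return 0
--     m = len(et)
--     for p in index.get(et[0], []):
--         if tokens[p:p+m] == et:
--             return p
--     return None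
--
--
-- def _bio_example(text, labels):
--     tokens = text.split()
--     # index each token's positions once; entities then only probe candidate positions
--     index = {}
--     for tok, p in zip(tokens, range(len(tokens))):
--         index.setdefault(tok, []).append(p)
--     token_labels = ['O'] * len(tokens)
--     for entity_text, entity_type in labels:
--         et = entity_text.split()
--         i = _first_match(tokens, et, index)
--         if i is not None:
--             token_labels[i] = 'B-' + entity_type
--             token_labels[i+1:i+len(et)] = ['I-' + entity_type] * (len(et) - 1)
--     return {'tokens': tokens, 'labels': token_labels}
--
--
-- def create_training_data_for_custom_ner(texts_and_labels):
--     return [_bio_example(text, labels) for text, labels in texts_and_labels]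
-- ===== Notes on version B (the rewrite author's own statement) =====
-- stated objective: alternative
-- what changed: B builds a per-text dict from token to its positions once, so each entity only tests the windows starting at occurrences of its first token (A rescans every window for every entity); labels are written with a slice splice and texts are processed with a list comprehension instead of append-folding.
import Mathlib
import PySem

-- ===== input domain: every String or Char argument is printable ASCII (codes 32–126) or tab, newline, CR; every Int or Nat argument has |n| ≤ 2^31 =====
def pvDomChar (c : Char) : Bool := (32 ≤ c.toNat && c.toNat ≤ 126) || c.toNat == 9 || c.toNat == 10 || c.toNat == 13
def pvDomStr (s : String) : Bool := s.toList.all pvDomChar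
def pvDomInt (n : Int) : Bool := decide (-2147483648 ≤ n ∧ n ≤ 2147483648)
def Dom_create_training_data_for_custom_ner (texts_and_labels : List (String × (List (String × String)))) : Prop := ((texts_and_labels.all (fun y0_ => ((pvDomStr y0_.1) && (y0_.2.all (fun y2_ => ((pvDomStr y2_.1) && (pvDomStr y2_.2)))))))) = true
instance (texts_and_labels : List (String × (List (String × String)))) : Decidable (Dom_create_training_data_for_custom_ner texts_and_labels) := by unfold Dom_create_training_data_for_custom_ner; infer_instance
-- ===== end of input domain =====

-- B replaces A's per-entity full-window scan by a per-text token→positions index probed at each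
-- entity's first token (objective: alternative algorithm, same results; not measured faster).


-- ===== PORT A =====
-- A's inner 'for i in range(…): if tokens[i:i+m] == entity_tokens: …; break' — recursion over the
-- index list models the break; tokens[i:i+m] with 0 ≤ i is (drop i).take m (exact for Nat bounds).
def pvScanA (tokens et : List String) (ty : String) (lbls : List String) : List Nat → List String
  | [] => lbls
  | i :: rest =>
      if (tokens.drop i).take et.length = et then
        -- token_labels[i] = 'B-…'; then for j in range(1, m): token_labels[i+j] = 'I-…'
        (List.range' 1 (et.length - 1)).foldl (fun acc j => acc.set (i + j) ("I-" ++ ty))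
          (lbls.set i ("B-" ++ ty))
      else pvScanA tokens et ty lbls rest

def create_training_data_for_custom_ner (texts_and_labels : List (String × (List (String × String)))) : List (List (String × List String)) :=
  texts_and_labels.foldl (fun training_data p =>
    let tokens := PySem.Str.split₀ p.1
    let token_labels := p.2.foldl (fun lbls e =>
        pvScanA tokens (PySem.Str.split₀ e.1) e.2 lbls
          (List.range (tokens.length + 1 - (PySem.Str.split₀ e.1).length)))
      (List.replicate tokens.length "O")
    training_data ++ [[("tokens", tokens), ("labels", token_labels)]]) []

-- ===== PORT B =====
-- index.setdefault(tok, []).append(p) over zip(tokens, range(n)): positions of each token, in order.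
def pvIndexB (tokens : List String) : PySem.Dict String (List Nat) :=
  (tokens.zipIdx).foldl (fun d p => d.modify p.1 [] (fun ps => ps ++ [p.2])) PySem.Dict.empty

-- _first_match: empty pattern matches at 0; else first indexed candidate whose window equals et.
def pvFindB (tokens : List String) (idx : PySem.Dict String (List Nat)) (et : List String) : Option Nat :=
  match et with
  | [] => some 0
  | h :: _ => (idx.getD h []).find? (fun p => decide ((tokens.drop p).take et.length = et))

-- token_labels[i] = 'B-…'; token_labels[i+1:i+m] = ['I-…']*(m-1): Python slice assignment replaces
-- l[min(i+1,n):max(min(i+1,n),min(i+m,n))]; take/drop clamp the same way, so this is exact.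
def pvApplyB (lbls : List String) (i m : Nat) (ty : String) : List String :=
  let l1 := lbls.set i ("B-" ++ ty)
  l1.take (i + 1) ++ List.replicate (m - 1) ("I-" ++ ty) ++ l1.drop (max (i + 1) (i + m))

def create_training_data_for_custom_ner_alt (texts_and_labels : List (String × (List (String × String)))) : List (List (String × List String)) :=
  texts_and_labels.map (fun p =>
    let tokens := PySem.Str.split₀ p.1
    let idx := pvIndexB tokens
    let token_labels := p.2.foldl (fun lbls e =>
        match pvFindB tokens idx (PySem.Str.split₀ e.1) with
        | none => lbls
        | some i => pvApplyB lbls i (PySem.Str.split₀ e.1).length e.2)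
      (List.replicate tokens.length "O")
    [("tokens", tokens), ("labels", token_labels)])

-- ===== PRECONDITION & SPEC =====
-- Pre_ excludes exactly the inputs where Python A raises IndexError (token_labels[0] on an empty
-- token list when some entity annotation splits to no tokens); Python B raises there too.
def Pre_create_training_data_for_custom_ner (texts_and_labels : List (String × (List (String × String)))) : Prop :=
  ∀ p ∈ texts_and_labels, PySem.Str.split₀ p.1 ≠ [] ∨ ∀ e ∈ p.2, PySem.Str.split₀ e.1 ≠ []
instance (texts_and_labels : List (String × (List (String × String)))) : Decidable (Pre_create_training_data_for_custom_ner texts_and_labels) := by unfold Pre_create_training_data_for_custom_ner; infer_instance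

def pvWitness_create_training_data_for_custom_ner : (List (String × (List (String × String)))) :=
  [("apt28 used malware", [("apt28", "THREAT"), ("malware", "MAL")])]

def Spec_create_training_data_for_custom_ner (texts_and_labels : List (String × (List (String × String)))) (out : List (List (String × List String))) : Prop := out = create_training_data_for_custom_ner_alt texts_and_labels
instance (texts_and_labels : List (String × (List (String × String)))) (out : List (List (String × List String))) : Decidable (Spec_create_training_data_for_custom_ner texts_and_labels out) := by unfold Spec_create_training_data_for_custom_ner; infer_instance

-- ===== CLAIM (what is proved, stated in full; the proofs are below) =====
def Claim_equal_create_training_data_for_custom_ner : Prop := ∀ (texts_and_labels : List (String × (List (String × String)))), Dom_create_training_data_for_custom_ner texts_and_labels → Pre_create_training_data_for_custom_ner texts_and_labels → Spec_create_training_data_for_custom_ner texts_and_labels (create_training_data_for_custom_ner texts_and_labels)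

-- ===== LEMMAS AND PROOFS =====

-- find? is unchanged when the predicates agree on the members
theorem pvFind?_congr {α : Type} (p q : α → Bool) (l : List α) (h : ∀ x ∈ l, p x = q x) :
    l.find? p = l.find? q := by
  induction l with
  | nil => rfl
  | cons a t ih =>
    have ha := h a (by simp)
    simp only [List.find?_cons, ha]
    cases q a
    · exact ih (fun x hx => h x (by simp [hx]))
    · rfl

-- a run of sets over a contiguous in-range index block is a splice
theorem pvSetRange (I : String) (k : Nat) : ∀ (a : Nat) (l : List String), a + k ≤ l.length →
    (List.range' a k).foldl (fun acc j => acc.set j I) l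
      = l.take a ++ List.replicate k I ++ l.drop (a + k) := by
  induction k with
  | zero => intro a l _; simp
  | succ k ih =>
    intro a l hl
    rw [List.range'_succ, List.foldl_cons, ih (a + 1) (l.set a I) (by simp; omega)]
    rw [List.take_set, List.drop_set, if_pos (by omega : a < a + 1 + k)]
    have ht : (List.take (a + 1) l).set a I = List.take a l ++ [I] := by
      rw [List.set_eq_take_cons_drop I (by simp; omega), List.take_take, List.drop_take]
      rw [show min a (a + 1) = a from by omega, show a + 1 - (a + 1) = 0 from by omega]
      simp
    rw [ht, List.replicate_succ, show a + 1 + k = a + (k + 1) from by omega]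
    simp [List.append_assoc]

-- the scan-with-break is the find? of the first matching window
theorem pvScanA_eq_find? (tokens et : List String) (ty : String) (lbls : List String)
    (is : List Nat) :
    pvScanA tokens et ty lbls is
      = match is.find? (fun i => decide ((tokens.drop i).take et.length = et)) with
        | none => lbls
        | some i => (List.range' 1 (et.length - 1)).foldl
            (fun acc j => acc.set (i + j) ("I-" ++ ty)) (lbls.set i ("B-" ++ ty)) := by
  induction is with
  | nil => rfl
  | cons i rest ih =>
    by_cases h : (tokens.drop i).take et.length = et
    · simp [pvScanA, h]
    · simp [pvScanA, h, ih]

-- dropping range elements past every possible match does not change find?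
theorem pvFindRangeShrink (p : Nat → Bool) (k k' : Nat) (hk : k ≤ k')
    (hp : ∀ i, k ≤ i → p i = false) :
    (List.range k').find? p = (List.range k).find? p := by
  obtain ⟨d, rfl⟩ := Nat.exists_eq_add_of_le hk
  rw [List.range_add, List.find?_append]
  have : (List.find? p (List.map (fun x => k + x) (List.range d))) = none := by
    rw [List.find?_eq_none]
    intro x hx
    obtain ⟨j, _, rfl⟩ := List.mem_map.mp hx
    simpa using hp (k + j) (by omega)
  simp [this]

-- the index lists exactly the positions of each token, in order
theorem pvIdx_getD (tokens : List String) (h : String) :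
    (pvIndexB tokens).getD h []
      = ((tokens.zipIdx.filter (fun p => p.1 == h)).map (·.2)) := by
  unfold pvIndexB
  rw [PySem.Dict.getD_foldl_modify_append]
  simp

-- searching the candidate positions of the first token finds the same first window as the full scan
theorem pvFindB_eq (tokens : List String) (h : String) (t : List String) :
    ((pvIndexB tokens).getD h []).find?
        (fun i => decide ((tokens.drop i).take (h :: t).length = h :: t))
      = (List.range (tokens.length + 1 - (h :: t).length)).find?
        (fun i => decide ((tokens.drop i).take (h :: t).length = h :: t)) := by
  set P : Nat → Bool := fun i => decide ((tokens.drop i).take (h :: t).length = h :: t) with hP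
  rw [pvIdx_getD, List.find?_map, List.find?_filter]
  have hcongr : ∀ x ∈ tokens.zipIdx,
      (decide ((x.1 == h) = true ∧ (P ∘ fun p => p.2) x = true)) = P x.2 := by
    rintro ⟨x1, x2⟩ hx
    obtain ⟨-, hlt, hx1⟩ := List.mem_zipIdx hx
    simp only [Nat.zero_add] at hlt
    by_cases hpx : P x2 = true
    · have : x1 = h := by
        have := of_decide_eq_true hpx
        rw [List.drop_eq_getElem_cons (by omega : x2 < tokens.length)] at this
        simp only [List.length_cons, List.take_succ_cons] at this
        have := (List.cons.injEq _ _ _ _).mp this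
        rw [hx1]; simpa using this.1
      simp [this, hpx]
    · simp only [Bool.not_eq_true] at hpx
      simp [hpx]
  rw [pvFind?_congr _ _ _ hcongr]
  have hdef : tokens.zipIdx.find? (fun x => P x.2)
      = tokens.zipIdx.find? (P ∘ fun p : String × Nat => p.2) := rfl
  rw [hdef, ← List.find?_map]
  have hsnd : tokens.zipIdx.map (fun p : String × Nat => p.2) = List.range tokens.length := by
    rw [List.zipIdx_eq_zip_range', List.range_eq_range']
    exact List.map_snd_zip (by simp)
  rw [hsnd]
  apply pvFindRangeShrink
  · simp only [List.length_cons]; omega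
  · intro i hi
    simp only [List.length_cons] at hi
    apply decide_eq_false
    intro heq
    have := congrArg List.length heq
    simp only [List.length_take, List.length_drop, List.length_cons] at this
    omega

-- one entity step: A's scan equals B's index lookup + splice (on label lists of the right length)
theorem pvPerEntity (tokens et : List String) (ty : String) (lbls : List String)
    (hl : lbls.length = tokens.length) :
    pvScanA tokens et ty lbls (List.range (tokens.length + 1 - et.length))
      = match pvFindB tokens (pvIndexB tokens) et with
        | none => lbls
        | some i => pvApplyB lbls i et.length ty := by
  cases et with
  | nil =>
    show pvScanA tokens [] ty lbls (List.range (tokens.length + 1 - 0)) = pvApplyB lbls 0 0 ty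
    rw [Nat.sub_zero, List.range_succ_eq_map]
    simp only [pvScanA, List.length_nil, List.take_zero, Nat.zero_sub,
      List.range'_zero, List.foldl_nil]
    show lbls.set 0 ("B-" ++ ty)
      = (lbls.set 0 ("B-" ++ ty)).take 1 ++ List.replicate 0 ("I-" ++ ty)
          ++ (lbls.set 0 ("B-" ++ ty)).drop (max 1 0)
    rw [show max 1 0 = 1 from rfl, List.replicate_zero]
    simp only [List.append_nil]
    exact (List.take_append_drop 1 _).symm
  | cons h t =>
    rw [pvScanA_eq_find?, ← pvFindB_eq]
    show _ = match (pvIndexB tokens |>.getD h []).find?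
        (fun p => decide ((tokens.drop p).take (h :: t).length = h :: t)) with
      | none => lbls
      | some i => pvApplyB lbls i (h :: t).length ty
    cases hfind : (pvIndexB tokens |>.getD h []).find?
        (fun p => decide ((tokens.drop p).take (h :: t).length = h :: t)) with
    | none => rfl
    | some i =>
      have hfs := List.find?_some hfind
      have hPi : (tokens.drop i).take (h :: t).length = h :: t := of_decide_eq_true hfs
      have hlen := congrArg List.length hPi
      simp only [List.length_take, List.length_drop, List.length_cons] at hlen
      have hbound : i + (t.length + 1) ≤ tokens.length := by omega
      simp only [List.length_cons, Nat.add_sub_cancel]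
      have hre : (List.range' 1 t.length).map (fun x => i + x) = List.range' (i + 1) t.length :=
        List.map_add_range' 1 t.length 1
      have hfm : List.foldl (fun acc j => acc.set (i + j) ("I-" ++ ty))
            (lbls.set i ("B-" ++ ty)) (List.range' 1 t.length)
          = List.foldl (fun acc j => acc.set j ("I-" ++ ty))
            (lbls.set i ("B-" ++ ty)) (List.range' (i + 1) t.length) := by
        rw [← hre, List.foldl_map]
      rw [hfm, pvSetRange ("I-" ++ ty) t.length (i + 1) _ (by simp; omega)]
      simp only [pvApplyB]
      rw [show max (i + 1) (i + (t.length + 1)) = i + 1 + t.length from by omega,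
        show t.length + 1 - 1 = t.length from rfl]

-- each entity step preserves the length of the label list
theorem pvStepB_len (tokens et : List String) (ty : String) (lbls : List String)
    (hl : lbls.length = tokens.length) :
    (match pvFindB tokens (pvIndexB tokens) et with
      | none => lbls
      | some i => pvApplyB lbls i et.length ty).length = tokens.length := by
  cases et with
  | nil =>
    show (pvApplyB lbls 0 0 ty).length = tokens.length
    simp [pvApplyB]
    omega
  | cons h t =>
    cases hfind : pvFindB tokens (pvIndexB tokens) (h :: t) with
    | none => exact hl
    | some i =>
      have hfs := List.find?_some hfind
      have hPi : (tokens.drop i).take (h :: t).length = h :: t := of_decide_eq_true hfs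
      have hlen := congrArg List.length hPi
      simp only [List.length_take, List.length_drop, List.length_cons] at hlen
      simp [pvApplyB]
      omega

-- the whole per-text entity folds agree
theorem pvPerText (tokens : List String) (es : List (String × String)) :
    ∀ (lbls : List String), lbls.length = tokens.length →
    es.foldl (fun lbls e =>
        pvScanA tokens (PySem.Str.split₀ e.1) e.2 lbls
          (List.range (tokens.length + 1 - (PySem.Str.split₀ e.1).length))) lbls
      = es.foldl (fun lbls e =>
          match pvFindB tokens (pvIndexB tokens) (PySem.Str.split₀ e.1) with
          | none => lbls
          | some i => pvApplyB lbls i (PySem.Str.split₀ e.1).length e.2) lbls := by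
  induction es with
  | nil => intro lbls _; rfl
  | cons e rest ih =>
    intro lbls hl
    simp only [List.foldl_cons]
    rw [pvPerEntity tokens (PySem.Str.split₀ e.1) e.2 lbls hl,
        ih _ (pvStepB_len tokens (PySem.Str.split₀ e.1) e.2 lbls hl)]

-- ===== VERDICT (by name: the statement is the Claim_ definition above) =====
theorem create_training_data_for_custom_ner_spec : Claim_equal_create_training_data_for_custom_ner := by
  intro tl _ _
  show create_training_data_for_custom_ner tl = create_training_data_for_custom_ner_alt tl
  unfold create_training_data_for_custom_ner create_training_data_for_custom_ner_alt
  rw [PySem.List.foldl_append_singleton_eq_map]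
  refine List.map_congr_left (fun p _ => ?_)
  simp only []
  rw [pvPerText (PySem.Str.split₀ p.1) p.2 _ (by simp)]
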